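-- pv_equiv track=rewrite | github.com/floatingCatty/Hubbard | gGA/model/operators.py | generate_product_basis
-- ===== SOURCE A (Python) =====
-- def generate_product_basis(norb_A, nocc_A, norb_B, nocc_B):
--     state_labels = [0, 1, 2, 3]
--     state_electrons = {0: 0, 1: 1, 2: 1, 3: 2}
--
--     total_norb = norb_A + norb_B
--     total_nocc = nocc_A + nocc_B
--
--     basis_states = []
--
--     stack = []
--     # Initialize the stack with the starting state
--     # (orbital_index, current_config, total_electrons, electrons_in_A, electrons_in_B)
--     stack.append((0, [], 0, 0, 0))
--
--     while stack:
--         orbital_index, current_config, total_electrons, electrons_in_A, electrons_in_B = stack.pop()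
--
--         # Early pruning based on total electrons
--         remaining_orbitals = total_norb - orbital_index
--         min_possible_electrons = total_electrons + remaining_orbitals * min(state_electrons.values())
--         max_possible_electrons = total_electrons + remaining_orbitals * max(state_electrons.values())
--
--         if min_possible_electrons > total_nocc or max_possible_electrons < total_nocc:
--             continue  # Prune branches that can't sum to total_nocc
--
--         # Early pruning based on electrons in subsystem A
--         if orbital_index < norb_A:
--             remaining_orbitals_A = norb_A - orbital_index
--             min_electrons_A = electrons_in_A + remaining_orbitals_A * min(state_electrons.values())
--             max_electrons_A = electrons_in_A + remaining_orbitals_A * max(state_electrons.values())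
--
--             if min_electrons_A > nocc_A or max_electrons_A < nocc_A:
--                 continue  # Prune branches that can't sum to nocc_A
--
--         # Early pruning based on electrons in subsystem B
--         else:
--             remaining_orbitals_B = norb_A + norb_B - orbital_index
--             min_electrons_B = electrons_in_B + remaining_orbitals_B * min(state_electrons.values())
--             max_electrons_B = electrons_in_B + remaining_orbitals_B * max(state_electrons.values())
--
--             if min_electrons_B > nocc_B or max_electrons_B < nocc_B:
--                 continue  # Prune branches that can't sum to nocc_B
--
--         if orbital_index == total_norb:
--             if total_electrons == total_nocc and electrons_in_A == nocc_A and electrons_in_B == nocc_B: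
--                 basis_states.append(list(current_config))
--             continue
--
--         for state in state_labels:
--             electrons = state_electrons[state]
--             new_total_electrons = total_electrons + electrons
--
--             # Prune if total electrons exceed the limit
--             if new_total_electrons > total_nocc:
--                 continue
--
--             if orbital_index < norb_A:
--                 new_electrons_in_A = electrons_in_A + electrons
--                 new_electrons_in_B = electrons_in_B
--                 # Prune if electrons in A exceed the limit
--                 if new_electrons_in_A > nocc_A:
--                     continue
--             else:
--                 new_electrons_in_B = electrons_in_B + electrons
--                 new_electrons_in_A = electrons_in_A
--                 # Prune if electrons in B exceed the limit
--                 if new_electrons_in_B > nocc_B: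
--                     continue
--
--             # Append the new state to the stack
--             stack.append((
--                 orbital_index + 1,
--                 current_config + [state],
--                 new_total_electrons,
--                 new_electrons_in_A,
--                 new_electrons_in_B
--             ))
--
--     return basis_states
-- ===== SOURCE B (Python) =====
-- def generate_product_basis(norb_A, nocc_A, norb_B, nocc_B):
--     total_norb = norb_A + norb_B
--     total_nocc = nocc_A + nocc_B
--     state_electrons = {0: 0, 1: 1, 2: 1, 3: 2}
--
--     def rec(i, cfg, tot, eA, eB):
--         # feasibility pruning (min = all-empty orbitals, max = all-doubly-occupied)
--         rem = total_norb - i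
--         if tot > total_nocc or tot + 2 * rem < total_nocc:
--             return []
--         if i < norb_A:
--             remA = norb_A - i
--             if eA > nocc_A or eA + 2 * remA < nocc_A:
--                 return []
--         else:
--             remB = total_norb - i
--             if eB > nocc_B or eB + 2 * remB < nocc_B:
--                 return []
--         if i == total_norb:
--             if tot == total_nocc and eA == nocc_A and eB == nocc_B:
--                 return [list(cfg)]
--             return []
--         res = []
--         for s in (3, 2, 1, 0):
--             e = state_electrons[s]
--             if tot + e > total_nocc:
--                 continue
--             if i < norb_A:
--                 if eA + e > nocc_A:
--                     continue
--                 res += rec(i + 1, cfg + [s], tot + e, eA + e, eB)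
--             else:
--                 if eB + e > nocc_B:
--                     continue
--                 res += rec(i + 1, cfg + [s], tot + e, eA, eB + e)
--         return res
--
--     return rec(0, [], 0, 0, 0)
-- ===== Notes on version B (the rewrite author's own statement) =====
-- stated objective: simpler
-- what changed: Replaces A's explicit work-stack while-loop (tuples pushed/popped with a shared basis_states accumulator) by a direct recursive DFS helper that returns the list of completed configurations, visiting states in order 3,2,1,0 to reproduce the stack's LIFO output order.
import Mathlib
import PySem

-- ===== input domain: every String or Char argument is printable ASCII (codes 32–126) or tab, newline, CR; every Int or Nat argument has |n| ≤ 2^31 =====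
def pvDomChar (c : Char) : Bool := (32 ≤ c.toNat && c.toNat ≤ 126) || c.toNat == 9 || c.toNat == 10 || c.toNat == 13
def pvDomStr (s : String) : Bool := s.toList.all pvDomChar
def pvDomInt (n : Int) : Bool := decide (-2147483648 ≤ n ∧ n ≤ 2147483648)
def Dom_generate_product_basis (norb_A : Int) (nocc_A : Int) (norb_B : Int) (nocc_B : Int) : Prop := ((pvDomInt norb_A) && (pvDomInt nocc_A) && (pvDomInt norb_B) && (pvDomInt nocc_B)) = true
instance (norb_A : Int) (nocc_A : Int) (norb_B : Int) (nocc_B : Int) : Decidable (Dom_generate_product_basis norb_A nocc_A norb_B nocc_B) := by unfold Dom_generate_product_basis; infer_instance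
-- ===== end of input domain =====

-- B replaces A's explicit work-stack loop by a direct recursive DFS returning the sublists; same pruning, same order (states visited 3,2,1,0 to match LIFO pops); objective: simpler.

-- ===== PORT A =====
-- state_electrons = {0:0, 1:1, 2:1, 3:2}; min(values)=0, max(values)=2 are written literally below.
def pvElecA (s : Int) : Int := if s = 0 then 0 else if s = 3 then 2 else 1

-- the body of the for-loop over state_labels for one state s: some pushed entry, or none if pruned
def pvChildA (norb_A : Int) (nocc_A : Int) (norb_B : Int) (nocc_B : Int)
    (i : Int) (cfg : List Int) (tot eA eB : Int) (s : Int) :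
    Option (Int × List Int × Int × Int × Int) :=
  if tot + pvElecA s > nocc_A + nocc_B then none
  else if i < norb_A then
    (if eA + pvElecA s > nocc_A then none
     else some (i + 1, cfg ++ [s], tot + pvElecA s, eA + pvElecA s, eB))
  else
    (if eB + pvElecA s > nocc_B then none
     else some (i + 1, cfg ++ [s], tot + pvElecA s, eA, eB + pvElecA s))

-- the survivors of the for-loop over state_labels = [0,1,2,3], in push order
def pvChildrenA (norb_A : Int) (nocc_A : Int) (norb_B : Int) (nocc_B : Int)
    (i : Int) (cfg : List Int) (tot eA eB : Int) :
    List (Int × List Int × Int × Int × Int) :=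
  ([0, 1, 2, 3] : List Int).filterMap (pvChildA norb_A nocc_A norb_B nocc_B i cfg tot eA eB)

-- termination helpers for the stack loop (cited by decreasing_by)
lemma pvChildA_fst (norb_A nocc_A norb_B nocc_B i : Int) (cfg : List Int) (tot eA eB s : Int)
    (e : Int × List Int × Int × Int × Int)
    (h : pvChildA norb_A nocc_A norb_B nocc_B i cfg tot eA eB s = some e) : e.1 = i + 1 := by
  unfold pvChildA at h
  split_ifs at h <;> simp at h <;> simp [← h]

lemma pvChildrenA_fst (norb_A nocc_A norb_B nocc_B i : Int) (cfg : List Int) (tot eA eB : Int) :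
    ∀ e ∈ pvChildrenA norb_A nocc_A norb_B nocc_B i cfg tot eA eB, e.1 = i + 1 := by
  intro e he
  simp only [pvChildrenA, List.mem_filterMap] at he
  obtain ⟨s, _, hfa⟩ := he
  exact pvChildA_fst norb_A nocc_A norb_B nocc_B i cfg tot eA eB s e hfa

lemma pvChildrenA_len (norb_A nocc_A norb_B nocc_B i : Int) (cfg : List Int) (tot eA eB : Int) :
    (pvChildrenA norb_A nocc_A norb_B nocc_B i cfg tot eA eB).length ≤ 4 := by
  have h := List.length_filterMap_le (l := ([0,1,2,3] : List Int))
    (f := pvChildA norb_A nocc_A norb_B nocc_B i cfg tot eA eB)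
  simpa [pvChildrenA] using h

lemma pv_map_const_sum (t j : Int) (l : List (Int × List Int × Int × Int × Int))
    (h : ∀ e ∈ l, e.1 = j) :
    (l.map (fun e => 5 ^ ((t - e.1).toNat))).sum = l.length * 5 ^ ((t - j).toNat) := by
  induction l with
  | nil => simp
  | cons a l ih =>
    have ha : a.1 = j := h a (by simp)
    simp [ha, ih (fun e he => h e (by simp [he])), Nat.succ_mul, Nat.add_comm]

lemma pv_children_measure (t i : Int) (hi : i < t)
    (l rest : List (Int × List Int × Int × Int × Int))
    (hlen : l.length ≤ 4) (hfst : ∀ e ∈ l, e.1 = i + 1) :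
    ((l.reverse ++ rest).map (fun e => 5 ^ ((t - e.1).toNat))).sum <
      5 ^ ((t - i).toNat) + (rest.map (fun e => 5 ^ ((t - e.1).toNat))).sum := by
  have hrev : ∀ e ∈ l.reverse, e.1 = i + 1 := fun e he => hfst e (List.mem_reverse.mp he)
  have hsum := pv_map_const_sum t (i + 1) l.reverse hrev
  have hk : (t - i).toNat = (t - (i + 1)).toNat + 1 := by omega
  have hpow : 4 * 5 ^ ((t - (i + 1)).toNat) < 5 ^ ((t - i).toNat) := by
    rw [hk, pow_succ]
    have : 0 < 5 ^ ((t - (i + 1)).toNat) := Nat.pow_pos (by norm_num)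
    omega
  have hlenr : l.reverse.length ≤ 4 := by simpa using hlen
  have : (l.reverse.map (fun e => 5 ^ ((t - e.1).toNat))).sum ≤ 4 * 5 ^ ((t - (i + 1)).toNat) := by
    rw [hsum]; exact Nat.mul_le_mul_right _ hlenr
  rw [List.map_append, List.sum_append]
  omega

-- the while-stack loop of A (stack head = top of Python's list; append-then-pop = prepend reversed survivors)
def pvLoopA (norb_A : Int) (nocc_A : Int) (norb_B : Int) (nocc_B : Int)
    (stack : List (Int × List Int × Int × Int × Int)) (acc : List (List Int)) :
    List (List Int) :=
  match stack with
  | [] => acc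
  | (i, cfg, tot, eA, eB) :: rest =>
    if hp : tot + (norb_A + norb_B - i) * 0 > nocc_A + nocc_B ∨
            tot + (norb_A + norb_B - i) * 2 < nocc_A + nocc_B then
      pvLoopA norb_A nocc_A norb_B nocc_B rest acc
    else if hs : (if i < norb_A then
            eA + (norb_A - i) * 0 > nocc_A ∨ eA + (norb_A - i) * 2 < nocc_A
          else
            eB + (norb_A + norb_B - i) * 0 > nocc_B ∨ eB + (norb_A + norb_B - i) * 2 < nocc_B) then
      pvLoopA norb_A nocc_A norb_B nocc_B rest acc
    else if hi : i = norb_A + norb_B then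
      if tot = nocc_A + nocc_B ∧ eA = nocc_A ∧ eB = nocc_B then
        pvLoopA norb_A nocc_A norb_B nocc_B rest (acc ++ [cfg])
      else
        pvLoopA norb_A nocc_A norb_B nocc_B rest acc
    else
      pvLoopA norb_A nocc_A norb_B nocc_B
        ((pvChildrenA norb_A nocc_A norb_B nocc_B i cfg tot eA eB).reverse ++ rest) acc
termination_by (stack.map (fun e => 5 ^ ((norb_A + norb_B - e.1).toNat))).sum
decreasing_by
  · simp only [List.map_cons, List.sum_cons]
    have : 0 < 5 ^ ((norb_A + norb_B - i).toNat) := Nat.pow_pos (by norm_num)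
    omega
  · simp only [List.map_cons, List.sum_cons]
    have : 0 < 5 ^ ((norb_A + norb_B - i).toNat) := Nat.pow_pos (by norm_num)
    omega
  · simp only [List.map_cons, List.sum_cons]
    have : 0 < 5 ^ ((norb_A + norb_B - i).toNat) := Nat.pow_pos (by norm_num)
    omega
  · simp only [List.map_cons, List.sum_cons]
    have : 0 < 5 ^ ((norb_A + norb_B - i).toNat) := Nat.pow_pos (by norm_num)
    omega
  · simp only [List.map_cons, List.sum_cons]
    have hi' : i < norb_A + norb_B := by
      simp only [not_or, not_lt] at hp
      omega
    exact pv_children_measure (norb_A + norb_B) i hi' _ rest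
      (pvChildrenA_len norb_A nocc_A norb_B nocc_B i cfg tot eA eB)
      (pvChildrenA_fst norb_A nocc_A norb_B nocc_B i cfg tot eA eB)

def generate_product_basis (norb_A : Int) (nocc_A : Int) (norb_B : Int) (nocc_B : Int) : List (List Int) :=
  pvLoopA norb_A nocc_A norb_B nocc_B [(0, [], 0, 0, 0)] []

-- ===== PORT B =====
-- state_electrons = {0:0, 1:1, 2:1, 3:2}
def pvElecB (s : Int) : Int := if s = 0 then 0 else if s = 3 then 2 else 1

-- recursive DFS of Source B
def pvRecB (norb_A : Int) (nocc_A : Int) (norb_B : Int) (nocc_B : Int)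
    (i : Int) (cfg : List Int) (tot eA eB : Int) : List (List Int) :=
  if hp : tot > nocc_A + nocc_B ∨ tot + 2 * (norb_A + norb_B - i) < nocc_A + nocc_B then []
  else if hs : (if i < norb_A then
          eA > nocc_A ∨ eA + 2 * (norb_A - i) < nocc_A
        else
          eB > nocc_B ∨ eB + 2 * (norb_A + norb_B - i) < nocc_B) then []
  else if hi : i = norb_A + norb_B then
    if tot = nocc_A + nocc_B ∧ eA = nocc_A ∧ eB = nocc_B then [cfg] else []
  else
    ([3, 2, 1, 0] : List Int).flatMap (fun s =>
      if tot + pvElecB s > nocc_A + nocc_B then []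
      else if i < norb_A then
        (if eA + pvElecB s > nocc_A then []
         else pvRecB norb_A nocc_A norb_B nocc_B (i + 1) (cfg ++ [s]) (tot + pvElecB s) (eA + pvElecB s) eB)
      else
        (if eB + pvElecB s > nocc_B then []
         else pvRecB norb_A nocc_A norb_B nocc_B (i + 1) (cfg ++ [s]) (tot + pvElecB s) eA (eB + pvElecB s)))
termination_by (norb_A + norb_B - i).toNat
decreasing_by
  · simp only [not_or, not_lt] at hp; omega
  · simp only [not_or, not_lt] at hp; omega

def generate_product_basis_alt (norb_A : Int) (nocc_A : Int) (norb_B : Int) (nocc_B : Int) : List (List Int) :=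
  pvRecB norb_A nocc_A norb_B nocc_B 0 [] 0 0 0

-- ===== PRECONDITION & SPEC =====
def Spec_generate_product_basis (norb_A : Int) (nocc_A : Int) (norb_B : Int) (nocc_B : Int) (out : List (List Int)) : Prop := out = generate_product_basis_alt norb_A nocc_A norb_B nocc_B
instance (norb_A : Int) (nocc_A : Int) (norb_B : Int) (nocc_B : Int) (out : List (List Int)) : Decidable (Spec_generate_product_basis norb_A nocc_A norb_B nocc_B out) := by unfold Spec_generate_product_basis; infer_instance

-- ===== CLAIM (what is proved, stated in full; the proofs are below) =====
def Claim_equal_generate_product_basis : Prop := ∀ (norb_A : Int) (nocc_A : Int) (norb_B : Int) (nocc_B : Int), Dom_generate_product_basis norb_A nocc_A norb_B nocc_B → Spec_generate_product_basis norb_A nocc_A norb_B nocc_B (generate_product_basis norb_A nocc_A norb_B nocc_B)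

-- ===== LEMMAS AND PROOFS =====

lemma pv_flatMap_filterMap {α β γ : Type} (g : α → Option β) (f : β → List γ) (l : List α) :
    (l.filterMap g).flatMap f = l.flatMap (fun a => (g a).elim [] f) := by
  induction l with
  | nil => simp
  | cons a l ih => cases h : g a <;> simp [h, ih]

lemma pvLoopA_eq (norb_A nocc_A norb_B nocc_B : Int)
    (stack : List (Int × List Int × Int × Int × Int)) (acc : List (List Int)) :
    pvLoopA norb_A nocc_A norb_B nocc_B stack acc =
      acc ++ stack.flatMap (fun e =>
        pvRecB norb_A nocc_A norb_B nocc_B e.1 e.2.1 e.2.2.1 e.2.2.2.1 e.2.2.2.2) := by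
  fun_induction pvLoopA norb_A nocc_A norb_B nocc_B stack acc with
  | case1 => simp
  | case2 acc i cfg tot eA eB rest hp ih =>
    rw [ih]
    simp only [List.flatMap_cons]
    rw [pvRecB.eq_def]
    have h1 : tot > nocc_A + nocc_B ∨ tot + 2 * (norb_A + norb_B - i) < nocc_A + nocc_B := by
      omega
    rw [dif_pos h1]
    simp
  | case3 acc i cfg tot eA eB rest hp hs ih =>
    rw [ih]
    simp only [List.flatMap_cons]
    rw [pvRecB.eq_def]
    have h1 : ¬(tot > nocc_A + nocc_B ∨ tot + 2 * (norb_A + norb_B - i) < nocc_A + nocc_B) := by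
      omega
    have h2 : if i < norb_A then eA > nocc_A ∨ eA + 2 * (norb_A - i) < nocc_A
              else eB > nocc_B ∨ eB + 2 * (norb_A + norb_B - i) < nocc_B := by
      split at hs <;> split <;> omega
    rw [dif_neg h1, dif_pos h2]
    simp
  | case4 acc cfg tot eA eB rest hfin hp hs ih =>
    rw [ih]
    simp only [List.flatMap_cons]
    rw [pvRecB.eq_def]
    have h1 : ¬(tot > nocc_A + nocc_B ∨
        tot + 2 * (norb_A + norb_B - (norb_A + norb_B)) < nocc_A + nocc_B) := by omega
    have h2 : ¬if norb_A + norb_B < norb_A then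
            eA > nocc_A ∨ eA + 2 * (norb_A - (norb_A + norb_B)) < nocc_A
          else eB > nocc_B ∨ eB + 2 * (norb_A + norb_B - (norb_A + norb_B)) < nocc_B := by
      split at hs <;> split <;> omega
    rw [dif_neg h1, dif_neg h2, dif_pos rfl, if_pos hfin]
    simp
  | case5 acc cfg tot eA eB rest hfin hp hs ih =>
    rw [ih]
    simp only [List.flatMap_cons]
    rw [pvRecB.eq_def]
    have h1 : ¬(tot > nocc_A + nocc_B ∨
        tot + 2 * (norb_A + norb_B - (norb_A + norb_B)) < nocc_A + nocc_B) := by omega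
    have h2 : ¬if norb_A + norb_B < norb_A then
            eA > nocc_A ∨ eA + 2 * (norb_A - (norb_A + norb_B)) < nocc_A
          else eB > nocc_B ∨ eB + 2 * (norb_A + norb_B - (norb_A + norb_B)) < nocc_B := by
      split at hs <;> split <;> omega
    rw [dif_neg h1, dif_neg h2, dif_pos rfl, if_neg hfin]
    simp
  | case6 acc i cfg tot eA eB rest hp hs hi ih =>
    rw [ih]
    rw [List.flatMap_append, List.flatMap_cons]
    have h1 : ¬(tot > nocc_A + nocc_B ∨ tot + 2 * (norb_A + norb_B - i) < nocc_A + nocc_B) := by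
      omega
    have h2 : ¬if i < norb_A then eA > nocc_A ∨ eA + 2 * (norb_A - i) < nocc_A
               else eB > nocc_B ∨ eB + 2 * (norb_A + norb_B - i) < nocc_B := by
      split at hs <;> split <;> omega
    have hrev : (pvChildrenA norb_A nocc_A norb_B nocc_B i cfg tot eA eB).reverse =
        ([3, 2, 1, 0] : List Int).filterMap (pvChildA norb_A nocc_A norb_B nocc_B i cfg tot eA eB) := by
      rw [pvChildrenA, ← List.filterMap_reverse]
      rfl
    have hchild : ((pvChildrenA norb_A nocc_A norb_B nocc_B i cfg tot eA eB).reverse.flatMap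
        (fun e => pvRecB norb_A nocc_A norb_B nocc_B e.1 e.2.1 e.2.2.1 e.2.2.2.1 e.2.2.2.2)) =
        pvRecB norb_A nocc_A norb_B nocc_B i cfg tot eA eB := by
      rw [pvRecB.eq_def, dif_neg h1, dif_neg h2, dif_neg hi, hrev,
        pv_flatMap_filterMap]
      have hpt : ∀ s : Int,
          (pvChildA norb_A nocc_A norb_B nocc_B i cfg tot eA eB s).elim []
            (fun e => pvRecB norb_A nocc_A norb_B nocc_B e.1 e.2.1 e.2.2.1 e.2.2.2.1 e.2.2.2.2) =
          (if tot + pvElecB s > nocc_A + nocc_B then []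
           else if i < norb_A then
             (if eA + pvElecB s > nocc_A then []
              else pvRecB norb_A nocc_A norb_B nocc_B (i + 1) (cfg ++ [s]) (tot + pvElecB s) (eA + pvElecB s) eB)
           else
             (if eB + pvElecB s > nocc_B then []
              else pvRecB norb_A nocc_A norb_B nocc_B (i + 1) (cfg ++ [s]) (tot + pvElecB s) eA (eB + pvElecB s))) := by
        intro s
        have he : pvElecA s = pvElecB s := rfl
        unfold pvChildA
        rw [he]
        split_ifs <;> simp
      simp only [List.flatMap_cons, List.flatMap_nil, hpt, List.append_nil]
    rw [hchild]

-- ===== VERDICT (by name: the statement is the Claim_ definition above) =====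
theorem generate_product_basis_spec : Claim_equal_generate_product_basis := by
  intro norb_A nocc_A norb_B nocc_B _
  unfold Spec_generate_product_basis generate_product_basis generate_product_basis_alt
  rw [pvLoopA_eq]
  simp
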